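-- pv_equiv track=rewrite | github.com/John75SunCity/ssh-git-github.com-odoo-odoo.git-18.0 | development-tools/specialized_syntax_fixer.py | fix_indentation_issues
-- ===== SOURCE A (Python) =====
-- def fix_indentation_issues(content):
--     """Fix general indentation issues"""
--     fixes_applied = 0
--
--     # Fix lines that have incorrect indentation levels
--     lines = content.split("\n")
--     fixed_lines = []
--
--     for i, line in enumerate(lines):
--         # Skip empty lines
--         if not line.strip():
--             fixed_lines.append(line)
--             continue
--
--         # Check for common indentation issues
--         stripped = line.lstrip()
--
--         # If line starts with help= and has wrong indentation
--         if stripped.startswith('help=') and len(line) - len(stripped) > 8: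
--             # Find proper indentation from context
--             proper_indent = 4
--             for j in range(i-1, max(0, i-5), -1):
--                 if "fields." in lines[j]:
--                     proper_indent = len(lines[j]) - len(lines[j].lstrip()) + 4
--                     break
--             fixed_lines.append(" " * proper_indent + stripped)
--             fixes_applied += 1
--         else:
--             fixed_lines.append(line)
--
--     if fixes_applied > 0:
--         content = "\n".join(fixed_lines)
--
--     return content, fixes_applied
-- ===== SOURCE B (Python) =====
-- def fix_indentation_issues(content):
--     """Fix general indentation issues (single forward pass with a running 'last fields. line' tracker)"""
--     lines = content.split("\n")
--     fixed_lines = []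
--     fixes_applied = 0
--     last_fields_idx = None      # index of the most recent line containing "fields."
--     last_fields_indent = 4      # its indent + 4
--     for i, line in enumerate(lines):
--         stripped = line.lstrip()
--         if stripped.startswith('help=') and len(line) - len(stripped) > 8:
--             # usable only if the tracked fields. line is within the last 4 lines and not line 0
--             if last_fields_idx is not None and last_fields_idx >= max(1, i - 4):
--                 proper_indent = last_fields_indent
--             else:
--                 proper_indent = 4
--             fixed_lines.append(" " * proper_indent + stripped)
--             fixes_applied += 1
--         else:
--             fixed_lines.append(line)
--         if "fields." in line:
--             last_fields_idx = i
--             last_fields_indent = len(line) - len(line.lstrip()) + 4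
--     if fixes_applied > 0:
--         return "\n".join(fixed_lines), fixes_applied
--     return content, fixes_applied
-- ===== Notes on version B (the rewrite author's own statement) =====
-- stated objective: alternative
-- what changed: Replaces A's per-help-line backward rescan of the previous four lines for a field-definition line by a single forward pass that maintains a running tracker (index, indent+4) of the most recently seen field-definition line, consulting it only when it lies within the 4-line window and is not line 0.
import Mathlib
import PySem

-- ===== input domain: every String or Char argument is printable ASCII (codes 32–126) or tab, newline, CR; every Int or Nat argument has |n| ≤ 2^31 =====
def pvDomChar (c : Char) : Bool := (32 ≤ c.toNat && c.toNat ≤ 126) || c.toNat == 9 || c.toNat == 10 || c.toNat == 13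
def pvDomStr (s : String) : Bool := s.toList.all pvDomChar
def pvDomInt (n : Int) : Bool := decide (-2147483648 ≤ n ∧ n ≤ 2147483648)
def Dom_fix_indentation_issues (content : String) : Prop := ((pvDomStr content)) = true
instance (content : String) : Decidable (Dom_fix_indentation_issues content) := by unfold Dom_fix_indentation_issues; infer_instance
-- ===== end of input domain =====

-- B replaces A's per-help-line backward rescan of up to 4 previous lines by one forward pass
-- that tracks the most recent "fields." line (alternative decomposition; same asymptotic cost).


-- ===== PORT A =====
-- A's inner backward loop 'for j in range(i-1, max(0, i-5), -1): if "fields." in lines[j]: …; break'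
-- (fuel = the number of indices the range visits, j counts down; returns proper_indent, default 4)
def pvA_scan (lines : List String) : Nat → Int → Int
  | 0, _ => 4
  | n + 1, j =>
    let lj := PySem.List.pyGetD lines j ""
    if PySem.Str.isIn "fields." lj then
      PySem.Str.len lj - PySem.Str.len (PySem.Str.lstrip lj) + 4
    else pvA_scan lines n (j - 1)

-- one iteration of A's main 'for i, line in enumerate(lines)' loop over (fixed_lines, fixes_applied)
def pvA_step (lines : List String) (acc : List String × Int) (p : Int × String) : List String × Int :=
  let i := p.1
  let line := p.2
  if PySem.Str.strip line = "" then (acc.1 ++ [line], acc.2)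
  else
    let stripped := PySem.Str.lstrip line
    if PySem.Str.startswith stripped "help=" && decide (8 < PySem.Str.len line - PySem.Str.len stripped) then
      let proper := pvA_scan lines ((i - 1) - max 0 (i - 5)).toNat (i - 1)
      (acc.1 ++ [String.ofList (List.replicate proper.toNat ' ') ++ stripped], acc.2 + 1)
    else (acc.1 ++ [line], acc.2)

def fix_indentation_issues (content : String) : String × Int :=
  let lines := (PySem.Str.split? content "\n").getD []
  let r := (PySem.List.enumerate lines).foldl (pvA_step lines) ([], 0)
  if r.2 > 0 then (PySem.Str.join "\n" r.1, r.2) else (content, r.2)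

-- ===== PORT B =====
-- one iteration of B's single forward pass; state = (fixed_lines, fixes_applied, tracker), the
-- tracker being (index, indent+4) of the most recent line containing "fields." (None at the start)
def pvB_step (st : List String × Int × Option (Int × Int)) (p : Int × String) : List String × Int × Option (Int × Int) :=
  let i := p.1
  let line := p.2
  let stripped := PySem.Str.lstrip line
  let handled : List String × Int :=
    if PySem.Str.startswith stripped "help=" && decide (8 < PySem.Str.len line - PySem.Str.len stripped) then
      let proper : Int :=
        match st.2.2 with
        | some (k, ind) => if k ≥ max 1 (i - 4) then ind else 4
        | none => 4
      (st.1 ++ [String.ofList (List.replicate proper.toNat ' ') ++ stripped], st.2.1 + 1)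
    else (st.1 ++ [line], st.2.1)
  let trk : Option (Int × Int) :=
    if PySem.Str.isIn "fields." line then
      some (i, PySem.Str.len line - PySem.Str.len (PySem.Str.lstrip line) + 4)
    else st.2.2
  (handled.1, handled.2, trk)

def fix_indentation_issues_alt (content : String) : String × Int :=
  let lines := (PySem.Str.split? content "\n").getD []
  let r := (PySem.List.enumerate lines).foldl pvB_step ([], 0, none)
  if r.2.1 > 0 then (PySem.Str.join "\n" r.1, r.2.1) else (content, r.2.1)

-- ===== PRECONDITION & SPEC =====
def Spec_fix_indentation_issues (content : String) (out : String × Int) : Prop := out = fix_indentation_issues_alt content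
instance (content : String) (out : String × Int) : Decidable (Spec_fix_indentation_issues content out) := by unfold Spec_fix_indentation_issues; infer_instance

-- ===== CLAIM (what is proved, stated in full; the proofs are below) =====
def Claim_equal_fix_indentation_issues : Prop := ∀ (content : String), Dom_fix_indentation_issues content → Spec_fix_indentation_issues content (fix_indentation_issues content)

-- ===== LEMMAS AND PROOFS =====

-- the value of B's tracker after processing the first i lines
def pvTrk (L : List String) : Nat → Option (Int × Int)
  | 0 => none
  | i + 1 =>
    let l := L.getD i ""
    if PySem.Str.isIn "fields." l then
      some ((i : Int), PySem.Str.len l - PySem.Str.len (PySem.Str.lstrip l) + 4)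
    else pvTrk L i

lemma pvTrk_none {L : List String} : ∀ {i : Nat}, pvTrk L i = none →
    ∀ m : Nat, m < i → PySem.Str.isIn "fields." (L.getD m "") = false := by
  intro i
  induction i with
  | zero => intro _ m hm; omega
  | succ n ih =>
    intro h m hm
    simp only [pvTrk] at h
    by_cases hc : PySem.Str.isIn "fields." (L.getD n "") = true
    · rw [if_pos hc] at h; exact absurd h (by simp)
    · rw [if_neg hc] at h
      rcases Nat.lt_succ_iff_lt_or_eq.1 hm with hm' | hm'
      · exact ih h m hm'
      · subst hm'; exact Bool.eq_false_iff.2 hc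

lemma pvTrk_some {L : List String} : ∀ {i : Nat} {k ind : Int}, pvTrk L i = some (k, ind) →
    ∃ kk : Nat, k = (kk : Int) ∧ kk < i ∧
      PySem.Str.isIn "fields." (L.getD kk "") = true ∧
      ind = PySem.Str.len (L.getD kk "") - PySem.Str.len (PySem.Str.lstrip (L.getD kk "")) + 4 ∧
      ∀ m : Nat, kk < m → m < i → PySem.Str.isIn "fields." (L.getD m "") = false := by
  intro i
  induction i with
  | zero => intro k ind h; simp [pvTrk] at h
  | succ n ih =>
    intro k ind h
    simp only [pvTrk] at h
    by_cases hc : PySem.Str.isIn "fields." (L.getD n "") = true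
    · rw [if_pos hc] at h
      simp only [Option.some.injEq, Prod.mk.injEq] at h
      rcases h with ⟨rfl, rfl⟩
      exact ⟨n, rfl, by omega, hc, rfl, fun m h1 h2 => absurd h1 (by omega)⟩
    · rw [if_neg hc] at h
      rcases ih h with ⟨kk, rfl, hlt, hf, hind, hnone⟩
      refine ⟨kk, rfl, by omega, hf, hind, ?_⟩
      intro m h1 h2
      rcases Nat.lt_succ_iff_lt_or_eq.1 h2 with h2' | h2'
      · exact hnone m h1 h2'
      · subst h2'; exact Bool.eq_false_iff.2 hc

-- A's backward scan finds nothing in its window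
lemma pvA_scan_none {L : List String} : ∀ (n j : Nat), n ≤ j →
    (∀ m : Nat, j - n < m → m ≤ j → PySem.Str.isIn "fields." (L.getD m "") = false) →
    pvA_scan L n (j : Int) = 4 := by
  intro n
  induction n with
  | zero => intro j _ _; rfl
  | succ n ih =>
    intro j hnj hno
    simp only [pvA_scan, PySem.List.pyGetD_natCast]
    rw [hno j (by omega) le_rfl]
    simp only [Bool.false_eq_true, if_false]
    have hj1 : (j : Int) - 1 = ((j - 1 : Nat) : Int) := by omega
    rw [hj1]
    exact ih (j - 1) (by omega) (fun m h1 h2 => hno m (by omega) (by omega))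

-- A's backward scan hits index k, the nearest "fields." line in its window
lemma pvA_scan_hit {L : List String} : ∀ (n j k : Nat), j - n < k → k ≤ j →
    PySem.Str.isIn "fields." (L.getD k "") = true →
    (∀ m : Nat, k < m → m ≤ j → PySem.Str.isIn "fields." (L.getD m "") = false) →
    pvA_scan L n (j : Int) =
      PySem.Str.len (L.getD k "") - PySem.Str.len (PySem.Str.lstrip (L.getD k "")) + 4 := by
  intro n
  induction n with
  | zero => intro j k h1 h2 _ _; omega
  | succ n ih =>
    intro j k h1 h2 hf hno
    simp only [pvA_scan, PySem.List.pyGetD_natCast]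
    by_cases hkj : k = j
    · subst hkj; rw [hf]; simp
    · rw [hno j (by omega) le_rfl]
      simp only [Bool.false_eq_true, if_false]
      have hj1 : (j : Int) - 1 = ((j - 1 : Nat) : Int) := by omega
      rw [hj1]
      exact ih (j - 1) k (by omega) (by omega) hf (fun m hm1 hm2 => hno m hm1 (by omega))

-- what B reads off its tracker at line index i
def pvTrkRead (trk : Option (Int × Int)) (i : Int) : Int :=
  match trk with
  | some (k, ind) => if k ≥ max 1 (i - 4) then ind else 4
  | none => 4

-- the scan's answer equals what B reads off its tracker
lemma pvA_scan_trk (L : List String) (i : Nat) :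
    pvA_scan L (((i : Int) - 1) - max 0 ((i : Int) - 5)).toNat ((i : Int) - 1)
      = pvTrkRead (pvTrk L i) (i : Int) := by
  cases i with
  | zero =>
    simp only [Nat.cast_zero]
    have h0 : ((0 : Int) - 1 - max 0 ((0 : Int) - 5)).toNat = 0 := by omega
    rw [h0]
    rfl
  | succ t =>
    have hj : ((t + 1 : Nat) : Int) - 1 = (t : Int) := by push_cast; ring
    rw [hj]
    rcases htrk : pvTrk L (t + 1) with _ | ⟨k, ind⟩
    · rw [pvA_scan_none _ t (by omega)
        (fun m h1 h2 => pvTrk_none htrk m (by omega))]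
      rfl
    · rcases pvTrk_some htrk with ⟨kk, rfl, hlt, hf, hind, hnone⟩
      simp only [pvTrkRead]
      by_cases hk : (kk : Int) ≥ max 1 (((t + 1 : Nat) : Int) - 4)
      · rw [pvA_scan_hit _ t kk (by omega) (by omega) hf
          (fun m h1 h2 => hnone m h1 (by omega))]
        rw [if_pos hk, hind]
      · rw [pvA_scan_none _ t (by omega)
          (fun m h1 h2 => by
            by_cases hmk : m = kk
            · omega
            · exact hnone m (by omega) (by omega))]
        rw [if_neg hk]

-- a line whose strip() is empty cannot start with 'help=' after lstrip()
lemma pv_strip_empty_no_help (s : String) (h : PySem.Str.strip s = "") :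
    PySem.Str.startswith (PySem.Str.lstrip s) "help=" = false := by
  have h2 : PySem.Chars.strip s.toList = [] := by
    have := congrArg String.toList h
    rwa [PySem.Str.toList_strip] at this
  have h3 : PySem.Chars.lstrip s.toList = [] := by
    simp only [PySem.Chars.strip, PySem.Chars.rstrip, PySem.Chars.lstrip] at *
    rw [List.reverse_eq_nil_iff, List.dropWhile_eq_nil_iff] at h2
    rw [List.dropWhile_eq_nil_iff]
    intro x hx
    rw [← List.takeWhile_append_dropWhile (p := PySem.Chars.isspace) (l := s.toList)] at hx
    rcases List.mem_append.1 hx with hm | hm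
    · exact List.mem_takeWhile_imp hm
    · exact h2 x (List.mem_reverse.2 hm)
  rw [PySem.Str.startswith_eq, PySem.Str.toList_lstrip, h3]
  decide

-- the two folds agree: A's (fixed_lines, fixes) equals the first two components of B's state
lemma pv_fold_eq (L : List String) : ∀ (rest : List String) (i : Nat) (out : List String) (fx : Int),
    L.drop i = rest →
    (PySem.List.enumerate rest (i : Int)).foldl (pvA_step L) (out, fx)
      = (((PySem.List.enumerate rest (i : Int)).foldl pvB_step (out, fx, pvTrk L i)).1,
         ((PySem.List.enumerate rest (i : Int)).foldl pvB_step (out, fx, pvTrk L i)).2.1) := by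
  intro rest
  induction rest with
  | nil => intro i out fx _; rfl
  | cons x xs ih =>
    intro i out fx hdrop
    have hix : L[i]? = some x := by rw [← List.head?_drop, hdrop]; rfl
    have hgetd : L.getD i "" = x := by rw [List.getD_eq_getElem?_getD, hix]; rfl
    have hdrop' : L.drop (i + 1) = xs := by
      rw [← List.tail_drop, hdrop, List.tail_cons]
    rw [PySem.List.enumerate_cons]
    simp only [List.foldl_cons]
    have hcast : (i : Int) + 1 = ((i + 1 : Nat) : Int) := by push_cast; ring
    have htrk' : pvTrk L (i + 1)
        = (if PySem.Str.isIn "fields." x then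
            some ((i : Int), PySem.Str.len x - PySem.Str.len (PySem.Str.lstrip x) + 4)
          else pvTrk L i) := by
      simp only [pvTrk, hgetd]
    have hstep : pvB_step (out, fx, pvTrk L i) ((i : Int), x)
        = ((pvA_step L (out, fx) ((i : Int), x)).1, (pvA_step L (out, fx) ((i : Int), x)).2, pvTrk L (i + 1)) := by
      rw [htrk']
      simp only [pvB_step, pvA_step]
      by_cases hstrip : PySem.Str.strip x = ""
      · rw [if_pos hstrip, pv_strip_empty_no_help x hstrip]
        simp
      · rw [if_neg hstrip]
        by_cases hcond : (PySem.Str.startswith (PySem.Str.lstrip x) "help="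
            && decide (8 < PySem.Str.len x - PySem.Str.len (PySem.Str.lstrip x))) = true
        · simp only [hcond, if_pos]
          rw [pvA_scan_trk L i]
          rfl
        · simp only [hcond, Bool.false_eq_true, if_false]
    rw [hstep, hcast, ih (i + 1) _ _ hdrop']

-- ===== VERDICT (by name: the statement is the Claim_ definition above) =====
theorem fix_indentation_issues_spec : Claim_equal_fix_indentation_issues := by
  unfold Claim_equal_fix_indentation_issues
  intro content _
  unfold Spec_fix_indentation_issues fix_indentation_issues fix_indentation_issues_alt
  have h := pv_fold_eq ((PySem.Str.split? content "\n").getD [])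
      ((PySem.Str.split? content "\n").getD []) 0 [] 0 (by simp)
  simp only [Nat.cast_zero] at h
  simp only [pvTrk] at h
  simp only [h]
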